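-- pv_equiv track=rewrite | github.com/SongmiLim/Algorithm | Simulation/bj_7568.py | huge_score
-- ===== SOURCE A (Python) =====
-- def huge_score(p_list):
--   score_list = []
--
--   for i in range(len(p_list)):
--     count = 0
--     for j in range(len(p_list)):
--       if p_list[i][0] < p_list[j][0] and p_list[i][1] < p_list[j][1]:
--         count+=1
--     score_list.append(count+1)
--
--   return score_list
-- ===== SOURCE B (Python) =====
-- def huge_score(p_list):
--     s = sorted(p_list, key=lambda p: -p[0])
--     score_list = []
--     for a, b in p_list:
--         c = 0
--         for x, y in s:
--             if x <= a:
--                 break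
--             if y > b:
--                 c += 1
--         score_list.append(c + 1)
--     return score_list
-- ===== Notes on version B (the rewrite author's own statement) =====
-- stated objective: alternative
-- what changed: B pre-sorts the points once by descending x and counts each point's dominators with an early-terminating scan that stops as soon as x-coordinates fall to or below the query point, instead of A's full nested rescans of the unsorted list.
import Mathlib
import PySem

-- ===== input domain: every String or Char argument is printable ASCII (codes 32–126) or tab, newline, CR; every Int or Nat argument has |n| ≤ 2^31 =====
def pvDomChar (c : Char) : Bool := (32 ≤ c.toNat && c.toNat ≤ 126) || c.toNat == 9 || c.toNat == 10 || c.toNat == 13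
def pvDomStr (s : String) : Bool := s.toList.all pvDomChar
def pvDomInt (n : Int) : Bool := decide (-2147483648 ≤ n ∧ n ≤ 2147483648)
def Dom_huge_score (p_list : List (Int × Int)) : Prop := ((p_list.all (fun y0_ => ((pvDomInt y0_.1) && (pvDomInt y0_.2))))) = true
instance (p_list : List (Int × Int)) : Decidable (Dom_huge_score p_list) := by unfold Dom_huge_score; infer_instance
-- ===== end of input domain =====

-- B pre-sorts the points once by descending x and counts dominators with an early-terminating
-- scan (alternative algorithm, same worst-case cost); proved to return exactly A's value.


-- ===== PORT A =====
def huge_score (p_list : List (Int × Int)) : List Int :=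
  (PySem.List.pyRange 0 (p_list.length : Int) 1).foldl (fun score_list i =>
    score_list ++
      [((PySem.List.pyRange 0 (p_list.length : Int) 1).foldl (fun count j =>
          if (PySem.List.pyGetD p_list i ((0 : Int), (0 : Int))).1 < (PySem.List.pyGetD p_list j ((0 : Int), (0 : Int))).1 ∧
             (PySem.List.pyGetD p_list i ((0 : Int), (0 : Int))).2 < (PySem.List.pyGetD p_list j ((0 : Int), (0 : Int))).2
          then count + 1 else count) 0) + 1]) []

-- ===== PORT B =====
-- the inner early-break scan of Source B
def hsScan (s : List (Int × Int)) (a b : Int) : Int :=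
  match s with
  | [] => 0
  | p :: t => if p.1 ≤ a then 0 else (if b < p.2 then 1 else 0) + hsScan t a b

def huge_score_alt (p_list : List (Int × Int)) : List Int :=
  let s := PySem.List.sorted p_list (fun p => -p.1) false
  p_list.foldl (fun score_list p => score_list ++ [hsScan s p.1 p.2 + 1]) []

-- ===== PRECONDITION & SPEC =====
def Spec_huge_score (p_list : List (Int × Int)) (out : List Int) : Prop := out = huge_score_alt p_list
instance (p_list : List (Int × Int)) (out : List Int) : Decidable (Spec_huge_score p_list out) := by unfold Spec_huge_score; infer_instance

-- ===== CLAIM (what is proved, stated in full; the proofs are below) =====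
def Claim_equal_huge_score : Prop := ∀ (p_list : List (Int × Int)), Dom_huge_score p_list → Spec_huge_score p_list (huge_score p_list)

-- ===== LEMMAS AND PROOFS =====

-- A's value: each entry is 1 + the number of strict both-coordinate dominators.
theorem huge_score_eq_map (l : List (Int × Int)) :
    huge_score l = l.map (fun p => ((l.countP (fun q => decide (p.1 < q.1 ∧ p.2 < q.2)) : Int) + 1)) := by
  unfold huge_score
  rw [PySem.List.foldl_pyRange_zero_pyGetD' l ((0 : Int), (0 : Int))
      (f := fun score_list p =>
        score_list ++ [((PySem.List.pyRange 0 (l.length : Int) 1).foldl (fun count j =>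
          if p.1 < (PySem.List.pyGetD l j ((0 : Int), (0 : Int))).1 ∧
             p.2 < (PySem.List.pyGetD l j ((0 : Int), (0 : Int))).2
          then count + 1 else count) 0) + 1]) (init := ([] : List Int))]
  rw [PySem.List.foldl_append_singleton_eq_map]
  simp only [List.nil_append]
  apply List.map_congr_left
  intro p _
  rw [PySem.List.foldl_pyRange_zero_pyGetD' l ((0 : Int), (0 : Int))
      (f := fun count q => if p.1 < q.1 ∧ p.2 < q.2 then count + 1 else count) (init := (0 : Int))]
  rw [PySem.List.foldl_ite_add_one]
  simp

-- On a list whose x-coordinates are non-increasing, the early-break scan counts all dominators.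
theorem hsScan_eq_countP (a b : Int) :
    ∀ (s : List (Int × Int)), s.Pairwise (fun u v => v.1 ≤ u.1) →
      hsScan s a b = (s.countP (fun q => decide (a < q.1 ∧ b < q.2)) : Int) := by
  intro s hs
  induction s with
  | nil => simp [hsScan]
  | cons p t ih =>
    rcases List.pairwise_cons.mp hs with ⟨hhead, htail⟩
    by_cases hpa : p.1 ≤ a
    · have hzero : (p :: t).countP (fun q => decide (a < q.1 ∧ b < q.2)) = 0 := by
        rw [List.countP_eq_zero]
        intro q hq
        rcases List.mem_cons.mp hq with h | h
        · subst h; simp only [decide_eq_true_eq, not_and]; intro h'; omega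
        · have := hhead q h
          simp only [decide_eq_true_eq, not_and]; intro h'; omega
      rw [show hsScan (p :: t) a b = 0 from by simp [hsScan, hpa], hzero]
      rfl
    · have := ih htail
      simp only [hsScan, if_neg hpa, this, List.countP_cons]
      by_cases hb : b < p.2 <;> simp [hb] <;> omega

theorem huge_score_alt_eq_map (l : List (Int × Int)) :
    huge_score_alt l = l.map (fun p => ((l.countP (fun q => decide (p.1 < q.1 ∧ p.2 < q.2)) : Int) + 1)) := by
  unfold huge_score_alt
  rw [PySem.List.foldl_append_singleton_eq_map]
  simp only [List.nil_append]
  apply List.map_congr_left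
  intro p _
  have hpair : (PySem.List.sorted l (fun p => -p.1) false).Pairwise (fun u v => v.1 ≤ u.1) := by
    have := PySem.List.sorted_pairwise l (fun p => -p.1)
    exact this.imp (by intro u v h; omega)
  rw [hsScan_eq_countP p.1 p.2 _ hpair,
      (PySem.List.sorted_perm l (fun p => -p.1) false).countP_eq]

-- ===== VERDICT (by name: the statement is the Claim_ definition above) =====
theorem huge_score_spec : Claim_equal_huge_score := by
  intro l _
  unfold Spec_huge_score
  rw [huge_score_eq_map, huge_score_alt_eq_map]
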